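-- pv_equiv track=rewrite | github.com/x4la/einsum | fast_einsum_v4.py | remove_diags
-- ===== SOURCE A (Python) =====
-- def remove_diags(s, strides, shape):
--     """ contains the main logic to remove diagonals
--
--         params: s           - str containing indices of a tensor.       Ex: "ijkijk"
--                 strides     - strides of tensor.                        Ex: (256, 128, 64, 32, 16, 8)
--                 shape       - shape of tensor.                          Ex: (2, 2, 2, 2, 2, 2)
--
--         returns: new_s      - str with all multiple indices removed     Ex: "ijk"
--                               (order: first appearance)
--                  new_strides- stride for unique index is computed as    Ex: (288, 144, 72)
--                               the sum of all strides for that index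
--                  new_shape  - new shape corresponding to new_s          Ex: (2, 2, 2)
--     """
--     seen = set()
--     repeated = set()
--     new_strides = {}
--     new_shape = {}
--     for i, char in enumerate(s):
--         if char in seen:
--             repeated.add(char)
--             new_strides[char] = new_strides[char] + strides[i]  # this is the main logic
--         else:
--             seen.add(char)
--             new_strides[char] = strides[i]
--             new_shape[char] = shape[i]
--     new_s = ''.join(new_strides.keys())
--     new_strides = tuple(new_strides.values())
--     new_shape = tuple(new_shape.values())
--     return new_s, new_strides, new_shape
-- ===== SOURCE B (Python) =====
-- def remove_diags(s, strides, shape):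
--     # Two-pass grouping: first index every character's positions, then derive
--     # the summed strides and first-occurrence shapes from that index.
--     positions = {}
--     for i, char in enumerate(s):
--         positions.setdefault(char, []).append(i)
--     new_s = ''.join(positions)
--     new_strides = tuple(sum(strides[i] for i in ps) for ps in positions.values())
--     new_shape = tuple(shape[ps[0]] for ps in positions.values())
--     return new_s, new_strides, new_shape
-- ===== Notes on version B (the rewrite author's own statement) =====
-- stated objective: alternative
-- what changed: A maintains four running structures (seen/repeated sets plus stride and shape dicts) updated conditionally in one loop; B first builds a char-to-positions index in one unconditional pass and then derives the joined string, summed strides and first-occurrence shapes in a separate pass over the groups.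
import Mathlib
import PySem

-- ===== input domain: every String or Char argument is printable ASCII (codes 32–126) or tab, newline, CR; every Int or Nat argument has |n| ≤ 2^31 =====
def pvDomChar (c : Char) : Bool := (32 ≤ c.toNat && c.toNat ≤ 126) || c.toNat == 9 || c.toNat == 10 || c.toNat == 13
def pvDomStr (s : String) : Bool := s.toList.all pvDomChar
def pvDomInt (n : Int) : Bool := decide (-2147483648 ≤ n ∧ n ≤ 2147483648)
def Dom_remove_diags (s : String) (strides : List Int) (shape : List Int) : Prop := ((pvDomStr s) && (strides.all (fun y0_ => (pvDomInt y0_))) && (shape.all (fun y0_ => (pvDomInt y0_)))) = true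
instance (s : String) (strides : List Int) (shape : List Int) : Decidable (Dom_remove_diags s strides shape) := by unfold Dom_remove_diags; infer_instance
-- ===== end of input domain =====

-- B replaces A's single four-state accumulating loop by an index-building pass
-- (char → list of positions) plus a separate derivation pass (objective: alternative).

-- ===== PORT A =====
-- one loop step of A: state (seen, repeated, new_strides, new_shape), item (i, char);
-- strides[i]/shape[i] are only read with i in range under Pre_, so pyGetD with default 0 is exact there,
-- and new_strides[char] in the seen-branch is always present, so getD 0 is exact too
def rdStepA (strides shape : List Int)
    (st : PySem.Set Char × PySem.Set Char × PySem.Dict Char Int × PySem.Dict Char Int)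
    (p : Int × Char) :
    PySem.Set Char × PySem.Set Char × PySem.Dict Char Int × PySem.Dict Char Int :=
  if PySem.Set.contains st.1 p.2 then
    (st.1, PySem.Set.add st.2.1 p.2,
     st.2.2.1.insert p.2 (st.2.2.1.getD p.2 0 + PySem.List.pyGetD strides p.1 0), st.2.2.2)
  else
    (PySem.Set.add st.1 p.2, st.2.1,
     st.2.2.1.insert p.2 (PySem.List.pyGetD strides p.1 0),
     st.2.2.2.insert p.2 (PySem.List.pyGetD shape p.1 0))

def remove_diags (s : String) (strides : List Int) (shape : List Int) : String × List Int × List Int :=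
  let st := (PySem.List.enumerate s.toList 0).foldl (rdStepA strides shape)
      (PySem.Set.empty, PySem.Set.empty, PySem.Dict.empty, PySem.Dict.empty)
  (String.ofList st.2.2.1.keys, st.2.2.1.values, st.2.2.2.values)

-- ===== PORT B =====
-- first pass: positions[char] = positions.get(char, []) + [i]
def rdIndexB (cs : List Char) : PySem.Dict Char (List Int) :=
  (PySem.List.enumerate cs 0).foldl (fun d p => d.insert p.2 (d.getD p.2 [] ++ [p.1])) PySem.Dict.empty

def remove_diags_alt (s : String) (strides : List Int) (shape : List Int) : String × List Int × List Int :=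
  let positions := rdIndexB s.toList
  (String.ofList positions.keys,
   positions.values.map (fun ps => (ps.map (fun i => PySem.List.pyGetD strides i 0)).sum),
   positions.values.map (fun ps => PySem.List.pyGetD shape (PySem.List.pyGetD ps 0 0) 0))

-- ===== PRECONDITION & SPEC =====
-- A indexes strides[i] and shape[i] for every i < len(s): shorter lists raise IndexError in A (and in B)
def Pre_remove_diags (s : String) (strides : List Int) (shape : List Int) : Prop :=
  s.toList.length ≤ strides.length ∧ s.toList.length ≤ shape.length
instance (s : String) (strides : List Int) (shape : List Int) : Decidable (Pre_remove_diags s strides shape) := by unfold Pre_remove_diags; infer_instance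

def pvWitness_remove_diags : String × List Int × List Int := ("ijkijk", [256, 128, 64, 32, 16, 8], [2, 2, 2, 2, 2, 2])

def Spec_remove_diags (s : String) (strides : List Int) (shape : List Int) (out : String × List Int × List Int) : Prop := out = remove_diags_alt s strides shape
instance (s : String) (strides : List Int) (shape : List Int) (out : String × List Int × List Int) : Decidable (Spec_remove_diags s strides shape out) := by unfold Spec_remove_diags; infer_instance

-- ===== CLAIM (what is proved, stated in full; the proofs are below) =====
def Claim_equal_remove_diags : Prop := ∀ (s : String) (strides : List Int) (shape : List Int), Dom_remove_diags s strides shape → Pre_remove_diags s strides shape → Spec_remove_diags s strides shape (remove_diags s strides shape)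

-- ===== LEMMAS AND PROOFS =====

theorem rd_enumerate_append (l : List Char) (a : Char) (n : Int) :
    PySem.List.enumerate (l ++ [a]) n = PySem.List.enumerate l n ++ [((n + l.length : Int), a)] := by
  induction l generalizing n with
  | nil => simp [PySem.List.enumerate_cons, PySem.List.enumerate_nil]
  | cons x xs ih =>
      simp [PySem.List.enumerate_cons, ih]
      ring_nf

def rdLoopA (strides shape : List Int) (cs : List Char) :
    PySem.Set Char × PySem.Set Char × PySem.Dict Char Int × PySem.Dict Char Int :=
  (PySem.List.enumerate cs 0).foldl (rdStepA strides shape)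
      (PySem.Set.empty, PySem.Set.empty, PySem.Dict.empty, PySem.Dict.empty)

-- abbreviations used only in the proofs
def rdG1 (strides : List Int) (p : Char × List Int) : Char × Int :=
  (p.1, (p.2.map (fun i => PySem.List.pyGetD strides i 0)).sum)

def rdG2 (shape : List Int) (p : Char × List Int) : Char × Int :=
  (p.1, PySem.List.pyGetD shape (PySem.List.pyGetD p.2 0 0) 0)

-- the loop invariant relating A's running state to B's position index
theorem rd_invariant (strides shape : List Int) (cs : List Char) :
    (rdLoopA strides shape cs).1 = (rdIndexB cs).keys ∧
    (rdIndexB cs).keys.Nodup ∧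
    (∀ p ∈ (rdIndexB cs).items, p.2 ≠ []) ∧
    (rdLoopA strides shape cs).2.2.1.items = (rdIndexB cs).items.map (rdG1 strides) ∧
    (rdLoopA strides shape cs).2.2.2.items = (rdIndexB cs).items.map (rdG2 shape) := by
  induction cs using List.reverseRecOn with
  | nil =>
      refine ⟨?_, ?_, ?_, ?_, ?_⟩ <;>
        simp [rdLoopA, rdIndexB, PySem.List.enumerate_nil, PySem.Set.empty,
          PySem.Dict.empty, PySem.Dict.keys]
  | append_singleton l a ih =>
      obtain ⟨h1, h2, h3, h4, h5⟩ := ih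
      have eA : rdLoopA strides shape (l ++ [a])
          = rdStepA strides shape (rdLoopA strides shape l) (((l.length : Int)), a) := by
        simp [rdLoopA, rd_enumerate_append, List.foldl_append]
      have eB : rdIndexB (l ++ [a])
          = (rdIndexB l).insert a ((rdIndexB l).getD a [] ++ [(l.length : Int)]) := by
        simp [rdIndexB, rd_enumerate_append, List.foldl_append]
      set st := rdLoopA strides shape l with hst
      set pos := rdIndexB l with hpos
      have hnsk : st.2.2.1.keys = pos.keys := by
        simp only [PySem.Dict.keys, h4, List.map_map]
        exact List.map_congr_left (fun p _ => rfl)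
      have hnshk : st.2.2.2.keys = pos.keys := by
        simp only [PySem.Dict.keys, h5, List.map_map]
        exact List.map_congr_left (fun p _ => rfl)
      have hnsnd : st.2.2.1.keys.Nodup := by rw [hnsk]; exact h2
      by_cases hmem : a ∈ pos.keys
      · -- a already seen: A updates the stride entry in place, B appends the position
        have hposc : pos.contains a = true := (PySem.Dict.contains_iff_mem_keys _ _).mpr hmem
        have hseen : PySem.Set.contains st.1 a = true := by
          simp [PySem.Set.contains, h1]; exact hmem
        have hnsc : st.2.2.1.contains a = true :=
          (PySem.Dict.contains_iff_mem_keys _ _).mpr (by rw [hnsk]; exact hmem)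
        have eA' : rdLoopA strides shape (l ++ [a])
            = (st.1, PySem.Set.add st.2.1 a,
               st.2.2.1.insert a (st.2.2.1.getD a 0 + PySem.List.pyGetD strides (l.length : Int) 0),
               st.2.2.2) := by
          rw [eA]; simp only [rdStepA]; rw [if_pos hseen]
        have eBitems : (rdIndexB (l ++ [a])).items
            = pos.items.map (fun p => if p.1 == a then (a, pos.getD a [] ++ [(l.length : Int)]) else p) := by
          rw [eB]; exact PySem.Dict.items_insert_of_contains _ _ hposc
        have hval : ∀ p ∈ pos.items, p.1 = a → p.2 = pos.getD a [] := by
          rintro ⟨pk, pv⟩ hp rfl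
          exact (PySem.Dict.getD_of_mem_items _ hp h2 []).symm
        refine ⟨?_, ?_, ?_, ?_, ?_⟩
        · rw [eA', eB, PySem.Dict.keys_insert_of_contains _ _ hposc]
          exact h1
        · rw [eB, PySem.Dict.keys_insert_of_contains _ _ hposc]
          exact h2
        · rw [eBitems]
          intro p hp
          simp only [List.mem_map] at hp
          obtain ⟨q, hq, rfl⟩ := hp
          by_cases hqa : q.1 == a
          · simp only [hqa, if_true]
            simp
          · simp only [hqa]
            simp only [Bool.false_eq_true, if_false]
            exact h3 q hq
        · -- new_strides items
          rw [eA', eBitems]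
          simp only [List.map_map]
          have hsum : st.2.2.1.getD a 0
              = ((pos.getD a []).map (fun i => PySem.List.pyGetD strides i 0)).sum := by
            have hmemk : a ∈ pos.items.map (·.1) := hmem
            simp only [List.mem_map] at hmemk
            obtain ⟨q, hq, hqa⟩ := hmemk
            have hq2 : q.2 = pos.getD a [] := hval q hq hqa
            have hm : (a, ((pos.getD a []).map (fun i => PySem.List.pyGetD strides i 0)).sum)
                ∈ st.2.2.1.items := by
              rw [h4]
              refine List.mem_map.mpr ⟨q, hq, ?_⟩
              simp [rdG1, hqa, hq2]
            exact PySem.Dict.getD_of_mem_items _ hm hnsnd 0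
          rw [PySem.Dict.items_insert_of_contains _ _ hnsc, h4]
          simp only [List.map_map]
          refine List.map_congr_left ?_
          intro p hp
          by_cases hpa : p.1 = a
          · have hp2 : p.2 = pos.getD a [] := hval p hp hpa
            simp [rdG1, hpa, hsum, hp2, Function.comp]
          · simp [rdG1, hpa, Function.comp]
        · -- new_shape items unchanged (first position of the group is unchanged)
          rw [eA', eBitems]
          simp only [List.map_map]
          rw [h5]
          refine List.map_congr_left ?_
          intro p hp
          by_cases hpa : p.1 = a
          · have hp2 : p.2 = pos.getD a [] := hval p hp hpa
            have hne : p.2 ≠ [] := h3 p hp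
            simp only [Function.comp_apply, hpa, beq_self_eq_true, if_true, rdG2]
            rw [← hp2]
            cases p2 : p.2 with
            | nil => exact absurd p2 hne
            | cons x xs => simp [PySem.List.pyGetD_zero]
          · simp [rdG2, hpa, Function.comp]
      · -- a is new: both sides append a fresh entry
        have hmem' : a ∉ st.1 := by rw [h1]; exact hmem
        have hposc : pos.contains a = false := by
          rcases Bool.eq_false_or_eq_true (pos.contains a) with h | h
          · exact absurd ((PySem.Dict.contains_iff_mem_keys _ _).mp h) hmem
          · exact h
        have hnsc : st.2.2.1.contains a = false := by
          rcases Bool.eq_false_or_eq_true (st.2.2.1.contains a) with h | h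
          · exact absurd (hnsk ▸ (PySem.Dict.contains_iff_mem_keys _ _).mp h) hmem
          · exact h
        have hnshc : st.2.2.2.contains a = false := by
          rcases Bool.eq_false_or_eq_true (st.2.2.2.contains a) with h | h
          · exact absurd (hnshk ▸ (PySem.Dict.contains_iff_mem_keys _ _).mp h) hmem
          · exact h
        have hgd : pos.getD a [] = [] := PySem.Dict.getD_of_not_contains _ _ hposc
        have eA' : rdLoopA strides shape (l ++ [a])
            = (PySem.Set.add st.1 a, st.2.1,
               st.2.2.1.insert a (PySem.List.pyGetD strides (l.length : Int) 0),
               st.2.2.2.insert a (PySem.List.pyGetD shape (l.length : Int) 0)) := by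
          rw [eA]; simp only [rdStepA]; rw [if_neg (by simp; exact hmem')]
        have eBitems : (rdIndexB (l ++ [a])).items
            = pos.items ++ [(a, [(l.length : Int)])] := by
          rw [eB, hgd]
          simpa using PySem.Dict.items_insert_of_not_contains _ _ hposc
        refine ⟨?_, ?_, ?_, ?_, ?_⟩
        · rw [eA', eB, hgd, PySem.Dict.keys_insert_of_not_contains _ _ hposc]
          rw [← h1]
          simp [PySem.Set.add, hmem']
        · rw [eB, hgd, PySem.Dict.keys_insert_of_not_contains _ _ hposc]
          simp [List.nodup_append, h2]
          intro x hx e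
          exact hmem (e ▸ hx)
        · rw [eBitems]
          intro p hp
          rcases List.mem_append.mp hp with h | h
          · exact h3 p h
          · simp only [List.mem_singleton] at h
            simp [h]
        · rw [eA', eBitems]
          simp only [List.map_append]
          rw [PySem.Dict.items_insert_of_not_contains _ _ hnsc, h4]
          simp [rdG1]
        · rw [eA', eBitems]
          simp only [List.map_append]
          rw [PySem.Dict.items_insert_of_not_contains _ _ hnshc, h5]
          simp [rdG2, PySem.List.pyGetD_zero_cons]

theorem rd_eq (s : String) (strides shape : List Int) :
    remove_diags s strides shape = remove_diags_alt s strides shape := by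
  obtain ⟨h1, h2, h3, h4, h5⟩ := rd_invariant strides shape s.toList
  have e1 : remove_diags s strides shape
      = (String.ofList (rdLoopA strides shape s.toList).2.2.1.keys,
         (rdLoopA strides shape s.toList).2.2.1.values,
         (rdLoopA strides shape s.toList).2.2.2.values) := rfl
  have e2 : remove_diags_alt s strides shape
      = (String.ofList (rdIndexB s.toList).keys,
         (rdIndexB s.toList).values.map (fun ps => (ps.map (fun i => PySem.List.pyGetD strides i 0)).sum),
         (rdIndexB s.toList).values.map (fun ps => PySem.List.pyGetD shape (PySem.List.pyGetD ps 0 0) 0)) := rfl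
  rw [e1, e2]
  refine Prod.ext ?_ (Prod.ext ?_ ?_)
  · show String.ofList _ = String.ofList _
    congr 1
    simp only [PySem.Dict.keys, h4, List.map_map]
    exact List.map_congr_left (fun p _ => rfl)
  · show (rdLoopA strides shape s.toList).2.2.1.values = _
    simp only [PySem.Dict.values, h4, List.map_map]
    exact List.map_congr_left (fun p _ => rfl)
  · show (rdLoopA strides shape s.toList).2.2.2.values = _
    simp only [PySem.Dict.values, h5, List.map_map]
    exact List.map_congr_left (fun p _ => rfl)

-- ===== VERDICT (by name: the statement is the Claim_ definition above) =====
theorem remove_diags_spec : Claim_equal_remove_diags := by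
  intro s strides shape _ _
  exact rd_eq s strides shape
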